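-- pv_equiv track=rewrite | github.com/TeeKay-FourTwentyOne/math | ramsey-book-graphs/algebraic_p3mod4.py | analyze_d12_as_translate
-- ===== SOURCE A (Python) =====
-- def analyze_d12_as_translate(p, D11, D12, g):
--     """Check if D12 \ {0} is a multiplicative translate of D11."""
--     D12_nonzero = D12 - {0}
--     best_shift = None
--     best_overlap = 0
--     for a in range(1, p - 1):
--         multiplier = pow(g, a, p)
--         shifted = frozenset((multiplier * d) % p for d in D11)
--         overlap = len(shifted & D12_nonzero)
--         if overlap > best_overlap:
--             best_overlap = overlap
--             best_shift = a
--     return best_shift, best_overlap, len(D12_nonzero)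
-- ===== SOURCE B (Python) =====
-- def analyze_d12_as_translate(p, D11, D12, g):
--     """Orbit-of-g algorithm: the multipliers g^a mod p form an eventually-repeating
--     orbit, so walk it only until the first repeated value (recording each distinct
--     multiplier's first exponent in a dict), compute each distinct multiplier's
--     overlap once, and take the first maximizer among those first exponents."""
--     D12_nonzero = D12 - {0}
--     first = {}
--     if p > 2:
--         a, m = 1, g % p
--         while a <= p - 2 and m not in first:
--             first[m] = a
--             m = (m * g) % p
--             a += 1
--     best_shift, best_overlap = None, 0
--     for m, a in first.items():
--         overlap = len(frozenset((m * d) % p for d in D11) & D12_nonzero)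
--         if overlap > best_overlap:
--             best_shift, best_overlap = a, overlap
--     return best_shift, best_overlap, len(D12_nonzero)
-- ===== Notes on version B (the rewrite author's own statement) =====
-- stated objective: faster
-- what changed: B walks the orbit of multipliers g^a mod p only until the first repeated value, recording each distinct multiplier's first exponent in a dict, computes one overlap per distinct multiplier, and scans those dict items for the first maximizer, instead of A's full pass over every exponent with a fresh pow per step.
import Mathlib
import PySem

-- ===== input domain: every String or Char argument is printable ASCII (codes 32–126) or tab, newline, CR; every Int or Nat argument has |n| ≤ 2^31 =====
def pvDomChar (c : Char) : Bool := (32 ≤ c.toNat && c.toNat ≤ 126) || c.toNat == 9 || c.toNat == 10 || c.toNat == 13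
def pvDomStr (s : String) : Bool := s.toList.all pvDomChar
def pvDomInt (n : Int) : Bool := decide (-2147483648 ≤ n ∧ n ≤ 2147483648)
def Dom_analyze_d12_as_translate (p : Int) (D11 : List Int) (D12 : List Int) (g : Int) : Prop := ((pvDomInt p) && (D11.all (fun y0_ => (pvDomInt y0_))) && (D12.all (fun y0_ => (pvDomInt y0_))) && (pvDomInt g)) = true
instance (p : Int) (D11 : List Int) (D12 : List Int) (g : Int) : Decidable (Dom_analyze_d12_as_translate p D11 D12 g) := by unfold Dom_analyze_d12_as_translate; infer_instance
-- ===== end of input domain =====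

-- B walks the orbit of multipliers g^a mod p only until its first repeated value
-- (a dict records each distinct multiplier's first exponent) and scans one overlap
-- per distinct multiplier; objective: faster (stops after ord(g) steps instead of p-3), same exact result.

-- ===== PORT A =====
def analyze_d12_as_translate (p : Int) (D11 : List Int) (D12 : List Int) (g : Int) : Option Int × Int × Int :=
  let d12nz : PySem.Set Int := PySem.Set.diff (PySem.Set.ofList D12) (PySem.Set.ofList [0])
  let r := (PySem.List.pyRange 1 (p-1) 1).foldl
    (fun (st : Option Int × Int) (a : Int) =>
      let multiplier := PySem.Int.powMod g a.toNat p
      let shifted := PySem.Set.ofList (D11.map (fun d => PySem.Int.mod (multiplier * d) p))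
      let overlap := PySem.Set.len (PySem.Set.inter shifted d12nz)
      if st.2 < overlap then (some a, overlap) else st)
    (none, 0)
  (r.1, r.2, PySem.Set.len d12nz)

-- ===== PORT B =====
-- the while loop of Source B: fuel (p-2).toNat realises the bound 'a <= p - 2' exactly (a starts at 1)
def pvOrbit (p g : Int) : Nat → Int → Int → PySem.Dict Int Int → PySem.Dict Int Int
  | 0, _, _, first => first
  | Nat.succ f, a, m, first =>
    if first.contains m then first
    else pvOrbit p g f (a+1) (PySem.Int.mod (m * g) p) (first.insert m a)

def analyze_d12_as_translate_alt (p : Int) (D11 : List Int) (D12 : List Int) (g : Int) : Option Int × Int × Int :=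
  let d12nz : PySem.Set Int := PySem.Set.diff (PySem.Set.ofList D12) (PySem.Set.ofList [0])
  let first : PySem.Dict Int Int :=
    if 2 < p then pvOrbit p g (p-2).toNat 1 (PySem.Int.mod g p) PySem.Dict.empty else PySem.Dict.empty
  let r := first.items.foldl
    (fun (st : Option Int × Int) (ma : Int × Int) =>
      let overlap := PySem.Set.len (PySem.Set.inter
        (PySem.Set.ofList (D11.map (fun d => PySem.Int.mod (ma.1 * d) p))) d12nz)
      if st.2 < overlap then (some ma.2, overlap) else st)
    (none, 0)
  (r.1, r.2, PySem.Set.len d12nz)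

-- ===== PRECONDITION & SPEC =====
def Spec_analyze_d12_as_translate (p : Int) (D11 : List Int) (D12 : List Int) (g : Int) (out : Option Int × Int × Int) : Prop := out = analyze_d12_as_translate_alt p D11 D12 g
instance (p : Int) (D11 : List Int) (D12 : List Int) (g : Int) (out : Option Int × Int × Int) : Decidable (Spec_analyze_d12_as_translate p D11 D12 g out) := by unfold Spec_analyze_d12_as_translate; infer_instance

-- ===== CLAIM (what is proved, stated in full; the proofs are below) =====
def Claim_equal_analyze_d12_as_translate : Prop := ∀ (p : Int) (D11 : List Int) (D12 : List Int) (g : Int), Dom_analyze_d12_as_translate p D11 D12 g → Spec_analyze_d12_as_translate p D11 D12 g (analyze_d12_as_translate p D11 D12 g)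

-- ===== LEMMAS AND PROOFS =====

-- overlap as a function of the multiplier value, and of the exponent
def pvFM (p : Int) (D11 D12 : List Int) (m : Int) : Int :=
  PySem.Set.len (PySem.Set.inter
    (PySem.Set.ofList (D11.map (fun d => PySem.Int.mod (m * d) p)))
    (PySem.Set.diff (PySem.Set.ofList D12) (PySem.Set.ofList [0])))

def pvF (p : Int) (D11 D12 : List Int) (g a : Int) : Int :=
  pvFM p D11 D12 (PySem.Int.powMod g a.toNat p)

-- the common strict-improvement scan step
def pvStep (p : Int) (D11 D12 : List Int) (g : Int) (st : Option Int × Int) (a : Int) : Option Int × Int :=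
  if st.2 < pvF p D11 D12 g a then (some a, pvF p D11 D12 g a) else st

theorem pv_powstep (g p : Int) (hp : 0 < p) (n : Nat) :
    PySem.Int.mod (PySem.Int.powMod g n p * g) p = PySem.Int.powMod g (n+1) p := by
  simp only [PySem.Int.powMod, PySem.Int.mod_eq_emod_of_pos hp, pow_succ]
  conv_rhs => rw [Int.mul_emod]
  conv_lhs => rw [Int.mul_emod, Int.emod_emod_of_dvd _ dvd_rfl]

theorem pv_pow_one (g p : Int) (hp : 0 < p) :
    PySem.Int.powMod g 1 p = PySem.Int.mod g p := by
  simp [PySem.Int.powMod, PySem.Int.mod_eq_emod_of_pos hp]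

theorem pvStep_best_le (p : Int) (D11 D12 : List Int) (g : Int) (st : Option Int × Int) (a : Int) :
    st.2 ≤ (pvStep p D11 D12 g st a).2 := by
  unfold pvStep; split
  · exact le_of_lt (by assumption)
  · exact le_refl _

theorem pvFold_best_mono (p : Int) (D11 D12 : List Int) (g : Int) (l : List Int) (st : Option Int × Int) :
    st.2 ≤ (l.foldl (pvStep p D11 D12 g) st).2 := by
  induction l generalizing st with
  | nil => simp
  | cons b l ih =>
    simp only [List.foldl_cons]
    exact le_trans (pvStep_best_le p D11 D12 g st b) (ih _)

theorem pvFold_best_ge (p : Int) (D11 D12 : List Int) (g : Int) (l : List Int) (st : Option Int × Int)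
    (a : Int) (h : a ∈ l) : pvF p D11 D12 g a ≤ (l.foldl (pvStep p D11 D12 g) st).2 := by
  induction l generalizing st with
  | nil => simp at h
  | cons b l ih =>
    simp only [List.foldl_cons]
    rcases List.mem_cons.mp h with rfl | h
    · refine le_trans ?_ (pvFold_best_mono p D11 D12 g l _)
      unfold pvStep; split
      · exact le_refl _
      · omega
    · exact ih _ h

theorem pvStep_absorb (p : Int) (D11 D12 : List Int) (g : Int) (st : Option Int × Int) (a : Int)
    (h : pvF p D11 D12 g a ≤ st.2) : pvStep p D11 D12 g st a = st := by
  unfold pvStep; rw [if_neg (by omega)]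

-- the scan over all exponents equals the scan over the prefix before the first repeat
theorem pvScan_trunc (p : Int) (D11 D12 : List Int) (g : Int) (c : Int) (hc : 1 ≤ c) (t : Nat)
    (hrep : ∀ j : Int, c ≤ j → j < c + (t:Int) → ∃ i, 1 ≤ i ∧ i < c ∧ pvF p D11 D12 g j = pvF p D11 D12 g i) :
    (PySem.List.pyRange 1 (c + (t:Int)) 1).foldl (pvStep p D11 D12 g) (none, 0)
      = (PySem.List.pyRange 1 c 1).foldl (pvStep p D11 D12 g) (none, 0) := by
  induction t with
  | zero => simp
  | succ k ih =>
    have hsplit : PySem.List.pyRange 1 (c + ((k+1:Nat):Int)) 1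
        = PySem.List.pyRange 1 (c + (k:Int)) 1 ++ [c + (k:Int)] := by
      have h := PySem.List.pyRange_one_succ_right (a := (1:Int)) (b := c + (k:Int)) (by omega)
      push_cast
      rw [show c + ((k:Int)+1) = (c + (k:Int)) + 1 by ring, h]
    rw [hsplit, List.foldl_append]
    have ih' := ih (fun j hj hj' => hrep j hj (by push_cast; omega))
    rw [ih']
    simp only [List.foldl_cons, List.foldl_nil]
    obtain ⟨i, hi1, hic, hfe⟩ := hrep (c + (k:Int)) (by omega) (by push_cast; omega)
    have himem : i ∈ PySem.List.pyRange 1 c 1 := by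
      rw [PySem.List.mem_pyRange_one]; omega
    exact pvStep_absorb p D11 D12 g _ _ (hfe ▸ pvFold_best_ge p D11 D12 g _ _ i himem)

-- once the multiplier sequence repeats an earlier value, it stays among the earlier values
theorem pvRepeat_all (p g : Int) (hp : 0 < p) (c : Int) (hc : 1 ≤ c)
    (hrep : ∃ i, 1 ≤ i ∧ i < c ∧ PySem.Int.powMod g c.toNat p = PySem.Int.powMod g i.toNat p) :
    ∀ j : Int, c ≤ j → ∃ i, 1 ≤ i ∧ i < c ∧ PySem.Int.powMod g j.toNat p = PySem.Int.powMod g i.toNat p := by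
  have key : ∀ t : Nat, ∃ i, 1 ≤ i ∧ i < c ∧
      PySem.Int.powMod g (c + (t:Int)).toNat p = PySem.Int.powMod g i.toNat p := by
    intro t
    induction t with
    | zero => simpa using hrep
    | succ k ih =>
      obtain ⟨i, hi1, hic, hie⟩ := ih
      have h1 : (c + ((k+1:Nat):Int)).toNat = (c + (k:Int)).toNat + 1 := by omega
      have h2 : (i + 1).toNat = i.toNat + 1 := by omega
      have hstep : PySem.Int.powMod g (c + ((k+1:Nat):Int)).toNat p
          = PySem.Int.powMod g (i+1).toNat p := by
        rw [h1, h2, ← pv_powstep g p hp, ← pv_powstep g p hp, hie]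
      by_cases hlt : i + 1 < c
      · exact ⟨i + 1, by omega, hlt, hstep⟩
      · have hieq : i + 1 = c := by omega
        obtain ⟨i', hi'1, hi'c, hi'e⟩ := hrep
        refine ⟨i', hi'1, hi'c, ?_⟩
        rw [hstep, hieq, hi'e]
  intro j hj
  have hj' : j = c + ((j - c).toNat : Int) := by omega
  rw [hj']; exact key _

-- the orbit loop builds exactly the dict { g^j mod p ↦ j } for j = 1 .. c-1,
-- where c is either the first repeat point or the end of the fuel
theorem pvOrbit_spec (p g : Int) (hp : 0 < p) :
    ∀ (f : Nat) (a : Int), 1 ≤ a → ∀ (dfirst : PySem.Dict Int Int),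
    dfirst.items = (PySem.List.pyRange 1 a 1).map (fun j => (PySem.Int.powMod g j.toNat p, j)) →
    ∃ c : Int, a ≤ c ∧ c ≤ a + (f:Int) ∧
      (pvOrbit p g f a (PySem.Int.powMod g a.toNat p) dfirst).items
        = (PySem.List.pyRange 1 c 1).map (fun j => (PySem.Int.powMod g j.toNat p, j)) ∧
      (c < a + (f:Int) → ∃ i, 1 ≤ i ∧ i < c ∧
        PySem.Int.powMod g c.toNat p = PySem.Int.powMod g i.toNat p) := by
  intro f
  induction f with
  | zero =>
    intro a ha dfirst hitems
    exact ⟨a, le_refl a, by omega, by simpa using hitems, by omega⟩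
  | succ k ih =>
    intro a ha dfirst hitems
    by_cases hcont : dfirst.contains (PySem.Int.powMod g a.toNat p) = true
    · refine ⟨a, le_refl a, by omega, by simp [pvOrbit, hcont, hitems], fun _ => ?_⟩
      have hmem : PySem.Int.powMod g a.toNat p ∈ dfirst.keys :=
        (PySem.Dict.contains_iff_mem_keys dfirst _).mp hcont
      rw [PySem.Dict.keys, hitems, List.map_map] at hmem
      obtain ⟨j, hjmem, hje⟩ := List.mem_map.mp hmem
      rw [PySem.List.mem_pyRange_one] at hjmem
      exact ⟨j, hjmem.1, hjmem.2, hje.symm⟩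
    · have hstep : PySem.Int.mod (PySem.Int.powMod g a.toNat p * g) p
          = PySem.Int.powMod g (a+1).toNat p := by
        rw [pv_powstep g p hp a.toNat]
        congr 1; omega
      have hitems' : (dfirst.insert (PySem.Int.powMod g a.toNat p) a).items
          = (PySem.List.pyRange 1 (a+1) 1).map (fun j => (PySem.Int.powMod g j.toNat p, j)) := by
        rw [PySem.Dict.items_insert_of_not_contains _ _ (by simpa using hcont), hitems,
          PySem.List.pyRange_one_succ_right (by omega), List.map_append]
        simp
      obtain ⟨c, hc1, hc2, hc3, hc4⟩ := ih (a+1) (by omega) _ hitems'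
      refine ⟨c, by omega, by push_cast; omega, ?_, fun h => hc4 (by push_cast at h ⊢; omega)⟩
      rw [pvOrbit]
      rw [if_neg (by simpa using hcont), hstep]
      exact hc3

-- ===== VERDICT (by name: the statement is the Claim_ definition above) =====
theorem analyze_d12_as_translate_spec : Claim_equal_analyze_d12_as_translate := by
  intro p D11 D12 g _
  unfold Spec_analyze_d12_as_translate
  unfold analyze_d12_as_translate analyze_d12_as_translate_alt
  by_cases hp : 3 ≤ p
  · -- A's loop body is pvStep
    have hA : ∀ l : List Int, l.foldl
        (fun (st : Option Int × Int) (a : Int) =>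
          let multiplier := PySem.Int.powMod g a.toNat p
          let shifted := PySem.Set.ofList (D11.map (fun d => PySem.Int.mod (multiplier * d) p))
          let overlap := PySem.Set.len (PySem.Set.inter shifted
            (PySem.Set.diff (PySem.Set.ofList D12) (PySem.Set.ofList [0])))
          if st.2 < overlap then (some a, overlap) else st)
        (none, 0)
        = l.foldl (pvStep p D11 D12 g) (none, 0) := fun l => rfl
    have hm1 : PySem.Int.mod g p = PySem.Int.powMod g (1:Int).toNat p := by
      rw [show ((1:Int).toNat) = 1 from rfl]
      exact (pv_pow_one g p (by omega)).symm
    obtain ⟨c, hc1, hc2, hc3, hc4⟩ := pvOrbit_spec p g (by omega) (p-2).toNat 1 (by omega)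
      PySem.Dict.empty (by rw [PySem.List.pyRange_one_eq_nil (le_refl (1:Int))]; rfl)
    -- B's fold over the dict items is the scan over exponents 1 .. c-1
    have hB : (if 2 < p then pvOrbit p g (p-2).toNat 1 (PySem.Int.mod g p) PySem.Dict.empty
          else PySem.Dict.empty).items.foldl
        (fun (st : Option Int × Int) (ma : Int × Int) =>
          let overlap := PySem.Set.len (PySem.Set.inter
            (PySem.Set.ofList (D11.map (fun d => PySem.Int.mod (ma.1 * d) p)))
            (PySem.Set.diff (PySem.Set.ofList D12) (PySem.Set.ofList [0])))
          if st.2 < overlap then (some ma.2, overlap) else st)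
        (none, 0)
        = (PySem.List.pyRange 1 c 1).foldl (pvStep p D11 D12 g) (none, 0) := by
      rw [if_pos (by omega : 2 < p), hm1, hc3, List.foldl_map]
      rfl
    -- A's range is the orbit prefix extended by repeats
    have hcle : c ≤ p - 1 := by omega
    have hsplit : p - 1 = c + (((p-1-c).toNat : Nat) : Int) := by omega
    have htrunc : (PySem.List.pyRange 1 (p-1) 1).foldl (pvStep p D11 D12 g) (none, 0)
        = (PySem.List.pyRange 1 c 1).foldl (pvStep p D11 D12 g) (none, 0) := by
      rw [hsplit]
      refine pvScan_trunc p D11 D12 g c (by omega) _ (fun j hj hj' => ?_)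
      have hrepc : ∃ i, 1 ≤ i ∧ i < c ∧
          PySem.Int.powMod g c.toNat p = PySem.Int.powMod g i.toNat p := by
        refine hc4 ?_
        have : j < p - 1 := by omega
        push_cast at hj' ⊢
        omega
      obtain ⟨i, hi1, hic, hie⟩ := pvRepeat_all p g (by omega) c (by omega) hrepc j hj
      exact ⟨i, hi1, hic, by unfold pvF; rw [hie]⟩
    simp only [hA, hB, htrunc]
  · have hnil : PySem.List.pyRange 1 (p-1) 1 = [] :=
      PySem.List.pyRange_one_eq_nil (by omega)
    rw [if_neg (by omega : ¬ 2 < p)]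
    simp only [hnil]
    rfl
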